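-- pv_equiv track=rewrite | github.com/imbinit17/Weatherify-Telegram-Bot | dataManipulation.py | addContent
-- ===== SOURCE A (Python) =====
-- def addContent(string):
--     #   string received starting from "
--
--     word = ""
--
--     index = 1
--     while(index<len(string)):
--         if(string[index]!='"'):
--             word += string[index]
--             index+=1
--
--         elif(string[index]=='"'):
--             index = len(string)
--
--     return word
-- ===== SOURCE B (Python) =====
-- def addContent(string):
--     idx = string.find('"', 1)
--     if idx == -1:
--         return string[1:]
--     return string[1:idx]
-- ===== Notes on version B (the rewrite author's own statement) =====
-- stated objective: faster
-- what changed: Replaces the char-by-char scan-and-accumulate while loop with locate-the-boundary (str.find from index 1) followed by a single slice.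
import Mathlib
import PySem

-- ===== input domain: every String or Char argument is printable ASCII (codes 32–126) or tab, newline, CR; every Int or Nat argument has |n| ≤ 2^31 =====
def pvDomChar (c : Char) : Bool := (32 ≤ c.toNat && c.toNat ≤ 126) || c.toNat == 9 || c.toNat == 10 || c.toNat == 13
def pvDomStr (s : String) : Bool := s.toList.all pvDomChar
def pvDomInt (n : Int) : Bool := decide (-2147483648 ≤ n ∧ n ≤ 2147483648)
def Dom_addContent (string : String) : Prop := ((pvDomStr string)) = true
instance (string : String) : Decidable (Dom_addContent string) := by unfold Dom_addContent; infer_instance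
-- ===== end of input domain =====

-- B replaces A's char-by-char accumulate loop with locate-first-quote-then-slice, avoiding A's repeated string concatenation (objective: faster, measured).

-- ===== PORT A =====
-- the while loop: word accumulates chars; hitting '"' sets index = len, ending the loop
def addContentLoopA (cs : List Char) (word : List Char) (index : Nat) : List Char :=
  if _h : index < cs.length then
    if cs.getD index ' ' ≠ '"' then
      addContentLoopA cs (word ++ [cs.getD index ' ']) (index + 1)
    else
      word            -- index = len(string); loop condition fails next, word returned
  else
    word
termination_by cs.length - index

def addContent (string : String) : String :=
  String.ofList (addContentLoopA string.toList [] 1)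

-- ===== PORT B =====
def addContent_alt (string : String) : String :=
  -- string.find('"', 1): hand port, exact here — single-char needle, start 1 acts as drop 1
  let idx : Int :=
    match (string.toList.drop 1).findIdx? (· == '"') with
    | none => -1
    | some j => (j : Int) + 1
  if idx = -1 then PySem.Str.slice string (some 1) none
  else PySem.Str.slice string (some 1) (some idx)

-- ===== PRECONDITION & SPEC =====
def Spec_addContent (string : String) (out : String) : Prop := out = addContent_alt string
instance (string : String) (out : String) : Decidable (Spec_addContent string out) := by unfold Spec_addContent; infer_instance

-- ===== CLAIM (what is proved, stated in full; the proofs are below) =====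
def Claim_equal_addContent : Prop := ∀ (string : String), Dom_addContent string → Spec_addContent string (addContent string)

-- ===== LEMMAS AND PROOFS =====

-- A's loop appends exactly the longest quote-free prefix of the tail from `index`
lemma loopA_eq (cs : List Char) (n : Nat) :
    ∀ word index, cs.length - index ≤ n →
      addContentLoopA cs word index = word ++ (cs.drop index).takeWhile (· != '"') := by
  induction n with
  | zero =>
      intro word index h
      have hge : cs.length ≤ index := by omega
      rw [addContentLoopA, dif_neg (by omega), List.drop_eq_nil_of_le hge]
      simp
  | succ n ih =>
      intro word index h
      by_cases hlt : index < cs.length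
      · have hd : cs.drop index = cs[index] :: cs.drop (index + 1) :=
          List.drop_eq_getElem_cons hlt
        have hg : cs.getD index ' ' = cs[index] := List.getD_eq_getElem cs ' ' hlt
        by_cases hne : cs[index] = '"'
        · rw [addContentLoopA, dif_pos hlt, if_neg (by rw [hg]; simpa using hne)]
          rw [hd, List.takeWhile_cons]
          simp [hne]
        · rw [addContentLoopA, dif_pos hlt, if_pos (by rw [hg]; simpa using hne)]
          rw [ih _ (index + 1) (by omega), hd, List.takeWhile_cons]
          have : (cs[index] != '"') = true := by simp [hne]
          rw [this]
          simp [List.getElem?_eq_getElem hlt]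
      · rw [addContentLoopA, dif_neg hlt, List.drop_eq_nil_of_le (by omega)]
        simp

-- `take` up to the first '"' (or everything if none) is `takeWhile (· != '"')`
lemma findIdx?_take_eq_takeWhile (t : List Char) :
    (match t.findIdx? (· == '"') with
      | none => t
      | some j => t.take j) = t.takeWhile (· != '"') := by
  induction t with
  | nil => simp
  | cons c t ih =>
      rw [List.findIdx?_cons, List.takeWhile_cons]
      by_cases hc : c = '"'
      · simp [hc]
      · have hcb : (c == '"') = false := by simp [hc]
        have hnb : (c != '"') = true := by simp [hc]
        rw [hcb, hnb]
        simp only [Bool.false_eq_true, if_false]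
        cases hfi : t.findIdx? (· == '"') with
        | none =>
            rw [hfi] at ih
            exact congrArg (List.cons c) ih
        | some j =>
            rw [hfi] at ih
            simp only [Option.map_some, List.take_succ_cons]
            exact congrArg (List.cons c) ih

theorem addContent_spec : Claim_equal_addContent := by
  intro s _
  unfold Spec_addContent addContent addContent_alt
  rw [loopA_eq s.toList (s.toList.length - 1) [] 1 (le_refl _)]
  have key := findIdx?_take_eq_takeWhile (s.toList.drop 1)
  cases hfi : (s.toList.drop 1).findIdx? (· == '"') with
  | none =>
      rw [hfi] at key
      simp only [if_true]
      rw [PySem.Str.slice]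
      simp only [PySem.Chars.slice]
      rw [PySem.List.slice_from s.toList (a := 1) (by norm_num)]
      rw [← key]
      simp
  | some j =>
      rw [hfi] at key
      rw [if_neg (by omega : ¬ ((j : Int) + 1 = -1))]
      rw [PySem.Str.slice]
      simp only [PySem.Chars.slice]
      rw [PySem.List.slice_toNat s.toList (a := 1) (b := (j : Int) + 1) (by norm_num) (by positivity)]
      have harith : ((j : Int) + 1).toNat - (1 : Int).toNat = j := by omega
      rw [harith, ← key]
      simp
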